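-- pv_equiv track=rewrite | github.com/sdegen95/AI-Seminar-ML | Gal-conjecture/Updated/gal_july24.py | euler_char
-- ===== SOURCE A (Python) =====
-- def euler_char(f_vec):
--     e_char = 0
--     new_f_vec = [f_vec[i] for i in range(len(f_vec)) if i != 0]
--
--     # Sum up the entry of the new_f_vec in an alternating manner
--     for i in range(len(new_f_vec)):
--         if i % 2 == 0:
--             e_char += new_f_vec[i]
--         else:
--             e_char -= new_f_vec[i]
--
--     return e_char
-- ===== SOURCE B (Python) =====
-- def euler_char(f_vec):
--     # alternating sum of the tail = (entries at odd positions) - (entries at even positions >= 2)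
--     return sum(f_vec[1::2]) - sum(f_vec[2::2])
-- ===== Notes on version B (the rewrite author's own statement) =====
-- stated objective: simpler
-- what changed: Replaces the filtered index comprehension plus a loop with a per-index parity branch by two strided slice sums: sum of odd-position entries minus sum of even-position entries.
import Mathlib
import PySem

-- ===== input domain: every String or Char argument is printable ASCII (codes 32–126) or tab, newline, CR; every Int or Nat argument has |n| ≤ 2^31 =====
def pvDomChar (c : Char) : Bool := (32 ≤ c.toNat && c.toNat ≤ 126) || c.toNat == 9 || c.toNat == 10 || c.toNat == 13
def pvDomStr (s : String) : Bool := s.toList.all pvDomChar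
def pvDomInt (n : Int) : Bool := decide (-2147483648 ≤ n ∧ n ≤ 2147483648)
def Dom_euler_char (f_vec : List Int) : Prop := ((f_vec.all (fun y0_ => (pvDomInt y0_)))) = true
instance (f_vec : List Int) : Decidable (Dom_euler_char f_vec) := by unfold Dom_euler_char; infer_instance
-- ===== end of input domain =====

-- B replaces A's index comprehension + parity-branch loop by two strided-slice sums (simpler; same cost).

-- ===== PORT A =====
def euler_char (f_vec : List Int) : Int :=
  let new_f_vec : List Int :=
    ((PySem.List.pyRange 0 (PySem.List.len f_vec) 1).filter (fun i => i ≠ 0)).map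
      (fun i => PySem.List.pyGetD f_vec i 0)
  (PySem.List.pyRange 0 (PySem.List.len new_f_vec) 1).foldl
    (fun e_char i =>
      if PySem.Int.mod i 2 == 0 then e_char + PySem.List.pyGetD new_f_vec i 0
      else e_char - PySem.List.pyGetD new_f_vec i 0) 0

-- ===== PORT B =====
def euler_char_alt (f_vec : List Int) : Int :=
  ((PySem.List.slice? f_vec (some 1) none 2).getD []).sum
    - ((PySem.List.slice? f_vec (some 2) none 2).getD []).sum

-- ===== PRECONDITION & SPEC =====
def Spec_euler_char (f_vec : List Int) (out : Int) : Prop := out = euler_char_alt f_vec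
instance (f_vec : List Int) (out : Int) : Decidable (Spec_euler_char f_vec out) := by unfold Spec_euler_char; infer_instance

-- ===== CLAIM (what is proved, stated in full; the proofs are below) =====
def Claim_equal_euler_char : Prop := ∀ (f_vec : List Int), Dom_euler_char f_vec → Spec_euler_char f_vec (euler_char f_vec)

-- ===== LEMMAS AND PROOFS =====

/-- Every second element, starting with the head: the value of `xs[0::2]`. -/
def sliceTwo : List Int → List Int
  | [] => []
  | [x] => [x]
  | x :: _ :: t => x :: sliceTwo t

/-- Alternating sum `x0 - x1 + x2 - …`. -/
def altsum : List Int → Int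
  | [] => 0
  | x :: t => x - altsum t

theorem sliceTwo_cons (y : Int) (t : List Int) :
    sliceTwo (y :: t) = y :: sliceTwo (t.drop 1) := by
  cases t <;> simp [sliceTwo]

theorem altsum_eq (t : List Int) :
    altsum t = (sliceTwo t).sum - (sliceTwo (t.drop 1)).sum := by
  induction t with
  | nil => simp [altsum, sliceTwo]
  | cons x t ih =>
    rw [altsum, sliceTwo_cons, ih]
    simp; ring

theorem filterMap_eq_map_of_some {α β : Type} (l : List α) (f : α → Option β) (g : α → β)
    (h : ∀ x ∈ l, f x = some (g x)) : l.filterMap f = l.map g := by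
  induction l with
  | nil => rfl
  | cons a l ih =>
    simp only [List.filterMap_cons, h a (by simp), List.map_cons]
    rw [ih (fun x hx => h x (by simp [hx]))]

/-- `xs[s::2]` (for natural `s`) is `sliceTwo` of the dropped list. -/
theorem slice?_two (xs : List Int) (s : Nat) :
    PySem.List.slice? xs (some (s : Int)) none 2 = some (sliceTwo (xs.drop s)) := by
  have key : ∀ (ys : List Int),
      (List.range ((ys.length + 1) / 2)).map (fun k => ys.getD (2 * k) 0) = sliceTwo ys := by
    intro ys
    induction ys using sliceTwo.induct with
    | case1 => simp [sliceTwo]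
    | case2 x => simp [sliceTwo]
    | case3 x y t ih =>
      have hc : ((x :: y :: t).length + 1) / 2 = (t.length + 1) / 2 + 1 := by simp; omega
      rw [hc, List.range_succ_eq_map]
      simp only [List.map_cons, List.map_map]
      rw [show (List.map ((fun k => (x :: y :: t).getD (2 * k) 0) ∘ (· + 1)) (List.range ((t.length + 1) / 2))) =
          (List.map (fun k => t.getD (2 * k) 0) (List.range ((t.length + 1) / 2))) by
        apply List.map_congr_left; intro k _
        simp [Function.comp]
        have : 2 * (k + 1) = 2 * k + 1 + 1 := by omega
        simp [this]]
      rw [ih]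
      simp [sliceTwo]
  unfold PySem.List.slice? PySem.List.sliceIndices
  simp only [if_neg (by norm_num : (2:Int) ≠ 0)]
  have h2 : ¬ ((2:Int) < 0) := by norm_num
  simp only [h2, if_false]
  by_cases hs : (s : Int) < 0
  · omega
  · simp only [hs, if_false]
    set n := xs.length with hn
    by_cases hlt : (s : Int) < (n : Int)
    · have hmin : min (s : Int) (n : Int) = (s : Int) := by omega
      simp only [hmin, hlt, if_true]
      have hcount : (((n : Int) - s + 2 - 1) / 2).toNat = ((xs.drop s).length + 1) / 2 := by
        simp only [List.length_drop, ← hn]; omega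
      rw [if_pos (by norm_num : (0:Int) < 2), hcount]
      congr 1
      have hsome : ∀ k ∈ List.range (((xs.drop s).length + 1) / 2),
          xs[((s : Int) + 2 * (k : Int)).toNat]? = some (xs.getD ((s : Int) + 2 * (k : Int)).toNat 0) := by
        intro k hk
        simp only [List.mem_range] at hk
        have hbound : ((s : Int) + 2 * (k : Int)).toNat < n := by
          simp only [List.length_drop, ← hn] at hk; omega
        rw [List.getElem?_eq_getElem (by simpa [← hn] using hbound)]
        rw [List.getD_eq_getElem _ _ (by simpa [← hn] using hbound)]
      rw [filterMap_eq_map_of_some _ _ _ hsome]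
      rw [← key (xs.drop s)]
      apply List.map_congr_left
      intro k hk
      simp only [List.mem_range] at hk
      have hidx : ((s : Int) + 2 * (k : Int)).toNat = s + 2 * k := by omega
      rw [hidx]
      have hbound : s + 2 * k < n := by
        simp only [List.length_drop, ← hn] at hk; omega
      rw [List.getD_eq_getElem _ _ (by simpa [← hn] using hbound),
          List.getD_eq_getElem _ _ (by simp [← hn]; omega),
          List.getElem_drop]
    · have hmin : min (s : Int) (n : Int) = (n : Int) := by omega
      simp only [hmin, lt_irrefl, if_false]
      have hdrop : xs.drop s = [] := List.drop_eq_nil_of_le (by omega)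
      simp [hdrop, sliceTwo]

/-- A's comprehension `[f_vec[i] for i in range(len(f_vec)) if i != 0]` is the tail. -/
theorem comprehension_eq_tail (xs : List Int) :
    ((PySem.List.pyRange 0 (PySem.List.len xs) 1).filter (fun i => i ≠ 0)).map
      (fun i => PySem.List.pyGetD xs i 0) = xs.drop 1 := by
  rcases xs with _ | ⟨x, t⟩
  · simp [PySem.List.pyRange_one_eq_nil, PySem.List.len]
  · have hlen : (0 : Int) < PySem.List.len (x :: t) := by
      simp [PySem.List.len]
    have h1 : (PySem.List.pyRange 0 (PySem.List.len (x :: t)) 1).filter (fun i => i ≠ 0)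
        = PySem.List.pyRange 1 (PySem.List.len (x :: t)) 1 := by
      rw [PySem.List.pyRange_one_cons hlen, List.filter_cons]
      norm_num
      intro a h1 _
      omega
    rw [h1]
    have := PySem.List.map_pyGetD_pyRange (x :: t) 0 (a := (1:Int)) (by omega)
    simpa using this

/-- A's loop over `range(s, len(xs))` computes `±altsum (xs.drop s)`. -/
theorem loopA (xs : List Int) : ∀ (s : Nat) (acc : Int),
    (PySem.List.pyRange (s : Int) (PySem.List.len xs) 1).foldl
      (fun e_char i =>
        if PySem.Int.mod i 2 == 0 then e_char + PySem.List.pyGetD xs i 0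
        else e_char - PySem.List.pyGetD xs i 0) acc
    = acc + (if s % 2 = 0 then altsum (xs.drop s) else -altsum (xs.drop s)) := by
  have hmeas : ∀ s : Nat, s < xs.length → xs.length - (s + 1) < xs.length - s := by omega
  intro s
  induction hn : xs.length - s using Nat.strong_induction_on generalizing s with
  | _ n ih =>
    intro acc
    by_cases hs : s < xs.length
    · have hlt : (s : Int) < PySem.List.len xs := by simp [PySem.List.len]; omega
      rw [PySem.List.pyRange_one_cons hlt, List.foldl_cons]
      have hget : PySem.List.pyGetD xs (s : Int) 0 = xs[s] := by
        rw [PySem.List.pyGetD_natCast, List.getD_eq_getElem _ _ hs]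
      have hdrop : xs.drop s = xs[s] :: xs.drop (s + 1) :=
        List.drop_eq_getElem_cons hs
      have hstep := ih (xs.length - (s + 1)) (by omega) (s + 1) rfl
        (if PySem.Int.mod (s : Int) 2 == 0 then acc + PySem.List.pyGetD xs (s : Int) 0
         else acc - PySem.List.pyGetD xs (s : Int) 0)
      rw [show ((s : Int) + 1) = ((s + 1 : Nat) : Int) by push_cast; ring, hstep, hget, hdrop,
        altsum]
      have hmod : (PySem.Int.mod (s : Int) 2 == 0) = decide (s % 2 = 0) := by
        simp only [PySem.Int.mod, Int.fmod_eq_emod]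
        by_cases h : s % 2 = 0 <;> simp [h] <;> omega
      rw [hmod]
      by_cases h : s % 2 = 0
      · have h1 : (s + 1) % 2 ≠ 0 := by omega
        simp [h, h1]; ring
      · have h1 : (s + 1) % 2 = 0 := by omega
        simp [h, h1]; ring
    · have : PySem.List.pyRange (s : Int) (PySem.List.len xs) 1 = [] := by
        apply PySem.List.pyRange_one_eq_nil
        simp [PySem.List.len]; omega
      rw [this, List.foldl_nil, List.drop_eq_nil_of_le (by omega)]
      simp [altsum]

theorem euler_char_eq_altsum (f_vec : List Int) :
    euler_char f_vec = altsum (f_vec.drop 1) := by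
  unfold euler_char
  rw [comprehension_eq_tail]
  have := loopA (f_vec.drop 1) 0 0
  simpa using this

-- ===== VERDICT (by name: the statement is the Claim_ definition above) =====
theorem euler_char_spec : Claim_equal_euler_char := by
  intro f_vec _
  unfold Spec_euler_char euler_char_alt
  have h1 := slice?_two f_vec 1
  have h2 := slice?_two f_vec 2
  push_cast at h1 h2
  rw [h1, h2, euler_char_eq_altsum, altsum_eq]
  simp
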